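-- pv_equiv track=rewrite | github.com/faulknerpearce/python_repository | sandbox/knapsack/knapsack.py | below_weight_combinations
-- ===== SOURCE A (Python) =====
-- from itertools import permutations
--
-- def is_unique(combination, dict):
--     for value in dict.values():
--         if combination == value:
--             return False
--     return True
--
-- def check_combination_weight(items, max_weight):
--     total_weight = 0
--     for item in items:
--         total_weight += item[1]
--     if total_weight <= max_weight:
--         return True
--     else:
--         return False
--
-- def below_weight_combinations(array, max_weight):
--     key = 0
--     bag = {}
--     combination_amount = len(array)
--
--     for i in range(len(array)):
--
--         for permutation in permutations(array, combination_amount):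
--
--             if check_combination_weight(permutation, max_weight):
--                 combination = sorted(list(permutation))
--
--                 if len(bag) > 0:
--                     if is_unique(combination, bag):
--                         bag.update({key: combination})
--                         key +=1
--                 else:
--                     bag.update({key: combination})
--                     key +=1
--         combination_amount -= 1
--
--     return bag
-- ===== SOURCE B (Python) =====
-- from itertools import combinations
--
-- def below_weight_combinations(array, max_weight):
--     bag = {}
--     key = 0
--     seen = set()
--     for k in range(len(array), 0, -1):
--         for combo in combinations(array, k):
--             if sum(item[1] for item in combo) <= max_weight:
--                 combination = sorted(combo)
--                 t = tuple(combination)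
--                 if t not in seen:
--                     seen.add(t)
--                     bag[key] = combination
--                     key += 1
--     return bag
-- ===== Notes on version B (the rewrite author's own statement) =====
-- stated objective: faster
-- what changed: B enumerates itertools.combinations of each size (each candidate multiset once) with an O(1) set-membership dedup, instead of A's enumerating every permutation of every size and linearly scanning all dict values for uniqueness.
import Mathlib
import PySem

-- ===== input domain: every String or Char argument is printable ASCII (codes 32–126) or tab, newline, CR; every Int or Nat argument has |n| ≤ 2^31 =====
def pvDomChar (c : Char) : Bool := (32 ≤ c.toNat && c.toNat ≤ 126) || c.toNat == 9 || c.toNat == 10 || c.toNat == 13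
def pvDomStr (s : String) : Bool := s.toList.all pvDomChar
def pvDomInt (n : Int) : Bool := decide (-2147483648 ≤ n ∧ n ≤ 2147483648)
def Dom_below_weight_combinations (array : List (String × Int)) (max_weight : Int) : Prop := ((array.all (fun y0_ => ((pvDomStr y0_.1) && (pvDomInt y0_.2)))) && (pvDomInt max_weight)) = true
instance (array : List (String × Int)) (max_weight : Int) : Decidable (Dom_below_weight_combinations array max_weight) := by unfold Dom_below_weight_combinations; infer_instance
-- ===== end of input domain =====

-- B replaces A's enumeration of permutations of every size with a dict-value scan for
-- uniqueness by an enumeration of combinations of every size with a set-membership dedup.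

-- ===== PORT A =====
-- Python `sorted` on lists of (str, int) tuples: stable sort under the lexicographic tuple order
def sortL (l : List (String × Int)) : List (String × Int) :=
  PySem.List.sorted l (fun p => toLex p)

-- is_unique(combination, dict): scan dict.values(), False on a match
def pvIsUnique (combination : List (String × Int)) (bag : PySem.Dict Int (List (String × Int))) : Bool :=
  bag.values.all (fun value => !(combination == value))

-- check_combination_weight(items, max_weight): accumulate item[1], compare to max_weight
def pvCheckWeight (items : List (String × Int)) (max_weight : Int) : Bool :=
  decide ((items.foldl (fun acc item => acc + item.2) 0) ≤ max_weight)

-- body of A's inner loop (one `permutation`); state (key, bag)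
def pvStepA (max_weight : Int) (s : Int × PySem.Dict Int (List (String × Int)))
    (perm : List (String × Int)) : Int × PySem.Dict Int (List (String × Int)) :=
  if pvCheckWeight perm max_weight then
    let combination := sortL perm
    if s.2.size > 0 then
      if pvIsUnique combination s.2 then (s.1 + 1, s.2.insert s.1 combination) else s
    else (s.1 + 1, s.2.insert s.1 combination)
  else s

-- body of A's outer loop (one value of `i`, unused); state ((key, bag), combination_amount)
def pvOuterA (array : List (String × Int)) (max_weight : Int)
    (st : (Int × PySem.Dict Int (List (String × Int))) × Int) (_i : Nat) :
    (Int × PySem.Dict Int (List (String × Int))) × Int :=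
  ((PySem.List.permutations array st.2.toNat).foldl (pvStepA max_weight) st.1, st.2 - 1)

def below_weight_combinations (array : List (String × Int)) (max_weight : Int) :
    List (Int × List (String × Int)) :=
  (((List.range array.length).foldl (pvOuterA array max_weight)
      ((0, ⟨[]⟩), (array.length : Int))).1.2).items

-- ===== PORT B =====
-- body of B's inner loop (one `combo`); state ((key, bag), seen)
def pvStepB (max_weight : Int)
    (s : (Int × PySem.Dict Int (List (String × Int))) × PySem.Set (List (String × Int)))
    (combo : List (String × Int)) :
    (Int × PySem.Dict Int (List (String × Int))) × PySem.Set (List (String × Int)) :=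
  if decide ((combo.map (fun item => item.2)).sum ≤ max_weight) then
    let combination := sortL combo
    if PySem.Set.contains s.2 combination then s
    else ((s.1.1 + 1, s.1.2.insert s.1.1 combination), PySem.Set.add s.2 combination)
  else s

-- body of B's outer loop (one size `k` from range(len(array), 0, -1))
def pvOuterB (array : List (String × Int)) (max_weight : Int)
    (st : (Int × PySem.Dict Int (List (String × Int))) × PySem.Set (List (String × Int)))
    (k : Int) : (Int × PySem.Dict Int (List (String × Int))) × PySem.Set (List (String × Int)) :=
  (PySem.List.combinations array k.toNat).foldl (pvStepB max_weight) st

def below_weight_combinations_alt (array : List (String × Int)) (max_weight : Int) :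
    List (Int × List (String × Int)) :=
  (((PySem.List.pyRange (array.length : Int) 0 (-1)).foldl (pvOuterB array max_weight)
      ((0, ⟨[]⟩), ([] : PySem.Set (List (String × Int))))).1.2).items

-- ===== PRECONDITION & SPEC =====
def Spec_below_weight_combinations (array : List (String × Int)) (max_weight : Int) (out : List (Int × List (String × Int))) : Prop := out = below_weight_combinations_alt array max_weight
instance (array : List (String × Int)) (max_weight : Int) (out : List (Int × List (String × Int))) : Decidable (Spec_below_weight_combinations array max_weight out) := by unfold Spec_below_weight_combinations; infer_instance

-- ===== CLAIM (what is proved, stated in full; the proofs are below) =====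
def Claim_equal_below_weight_combinations : Prop := ∀ (array : List (String × Int)) (max_weight : Int), Dom_below_weight_combinations array max_weight → Spec_below_weight_combinations array max_weight (below_weight_combinations array max_weight)

-- ===== LEMMAS AND PROOFS =====

-- proof-side abbreviations: a bag value and a bag entry
abbrev PVal : Type := List (String × Int)
abbrev PEntry : Type := Int × PVal

def pvD0 : String × Int := ("", 0)

-- first-occurrence dedup of a stream, the seen set given as a Boolean predicate
def dedB (m : PVal → Bool) : List PVal → List PVal
  | [] => []
  | v :: L => if m v then dedB m L else v :: dedB (fun w => decide (w = v) || m w) L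

@[simp] theorem dedB_nil (m : PVal → Bool) : dedB m [] = [] := rfl
theorem dedB_cons (m : PVal → Bool) (v : PVal) (L : List PVal) :
    dedB m (v :: L) = if m v then dedB m L else v :: dedB (fun w => decide (w = v) || m w) L := rfl

def mOf (bag : List PEntry) : PVal → Bool := fun v => decide (v ∈ bag.map Prod.snd)
def dedStep (st : Int × List PEntry) (v : PVal) : Int × List PEntry :=
  if v ∈ st.2.map Prod.snd then st else (st.1 + 1, st.2 ++ [(st.1, v)])
def zipFrom : Int → List PVal → List PEntry
  | _, [] => []
  | k, v :: l => (k, v) :: zipFrom (k + 1) l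
def wOK (max_weight : Int) (v : PVal) : Bool := decide ((v.map (fun item => item.2)).sum ≤ max_weight)
def SA (array : List (String × Int)) (max_weight : Int) (k : Nat) : List PVal :=
  ((PySem.List.permutations array k).map sortL).filter (wOK max_weight)
def SB (array : List (String × Int)) (max_weight : Int) (k : Nat) : List PVal :=
  ((PySem.List.combinations array k).map sortL).filter (wOK max_weight)
def AStream (array : List (String × Int)) (max_weight : Int) : Int → Nat → List PVal
  | _, 0 => []
  | ca, j + 1 => SA array max_weight ca.toNat ++ AStream array max_weight (ca - 1) j
def BStream (array : List (String × Int)) (max_weight : Int) : Nat → List PVal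
  | 0 => []
  | j + 1 => SB array max_weight (j + 1) ++ BStream array max_weight j
def InvA (s : Int × PySem.Dict Int PVal) : Prop := ∀ e ∈ s.2.items, e.1 < s.1
def absA (s : Int × PySem.Dict Int PVal) : Int × List PEntry := (s.1, s.2.items)
def InvB (s : (Int × PySem.Dict Int PVal) × PySem.Set PVal) : Prop :=
  InvA s.1 ∧ ∀ v : PVal, v ∈ s.2 ↔ v ∈ s.1.2.items.map Prod.snd


theorem dedB_congr (L : List PVal) : ∀ (m m' : PVal → Bool), (∀ v ∈ L, m v = m' v) → dedB m L = dedB m' L := by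
  induction L with
  | nil => intro m m' _; rfl
  | cons v L ih =>
    intro m m' h
    rw [dedB_cons, dedB_cons, h v (by simp)]
    by_cases hm : m' v = true
    · rw [if_pos hm, if_pos hm]
      exact ih _ _ (fun w hw => h w (by simp [hw]))
    · rw [if_neg hm, if_neg hm]
      refine congrArg _ (ih _ _ (fun w hw => ?_))
      rw [h w (by simp [hw])]

theorem dedB_append (L1 L2 : List PVal) : ∀ m, dedB m (L1 ++ L2) = dedB m L1 ++ dedB (fun v => decide (v ∈ dedB m L1) || m v) L2 := by
  induction L1 with
  | nil =>
    intro m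
    simp only [List.nil_append, dedB_nil]
    exact (dedB_congr L2 _ _ (fun v _ => by simp)).symm
  | cons v L1 ih =>
    intro m
    by_cases hm : m v = true
    · have hD : dedB m (v :: L1) = dedB m L1 := by rw [dedB_cons, if_pos hm]
      rw [List.cons_append, dedB_cons, if_pos hm, ih m, hD]
    · have hD : dedB m (v :: L1) = v :: dedB (fun w => decide (w = v) || m w) L1 := by
        rw [dedB_cons, if_neg hm]
      rw [List.cons_append, dedB_cons, if_neg hm, ih, hD, List.cons_append]
      refine congrArg _ (congrArg _ (dedB_congr L2 _ _ (fun w _ => ?_)))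
      by_cases h1 : w = v <;> by_cases h2 : w ∈ dedB (fun u => decide (u = v) || m u) L1 <;>
        simp [h1, h2, hm]

theorem dedB_mem {v : PVal} (L : List PVal) : ∀ (m : PVal → Bool), v ∈ L → m v = true ∨ v ∈ dedB m L := by
  induction L with
  | nil => intro m h; simp at h
  | cons a L ih =>
    intro m h
    by_cases hm : m a = true
    · rw [dedB_cons, if_pos hm]
      rcases List.mem_cons.mp h with h1 | h1
      · subst h1; exact Or.inl hm
      · exact ih m h1
    · rw [dedB_cons, if_neg hm]
      rcases List.mem_cons.mp h with h1 | h1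
      · subst h1; exact Or.inr (by simp)
      · rcases ih (fun w => decide (w = a) || m w) h1 with h2 | h2
        · by_cases h3 : v = a
          · subst h3; exact Or.inr (by simp)
          · simp [h3] at h2; exact Or.inl h2
        · exact Or.inr (by simp [h2])

theorem dedB_drop (m0 : PVal → Bool) (L : List PVal) : ∀ m, (∀ v ∈ L, m0 v = true → m v = true) →
    dedB m L = dedB m (L.filter (fun v => !(m0 v))) := by
  induction L with
  | nil => intro m _; rfl
  | cons a L ih =>
    intro m hm
    by_cases h0 : m0 a = true
    · have hma : m a = true := hm a (by simp) h0
      rw [dedB_cons, if_pos hma, List.filter_cons_of_neg (by simp [h0])]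
      exact ih m (fun v hv => hm v (by simp [hv]))
    · rw [List.filter_cons_of_pos (by simp [h0])]
      by_cases hma : m a = true
      · rw [dedB_cons, if_pos hma, dedB_cons, if_pos hma]
        exact ih m (fun v hv => hm v (by simp [hv]))
      · rw [dedB_cons, if_neg hma, dedB_cons, if_neg hma]
        refine congrArg _ (ih _ (fun v hv h => ?_))
        rw [hm v (by simp [hv]) h, Bool.or_true]

theorem dedB_filter_extend (q : PVal → Bool) (a : PVal) (hq : q a = false) (L : List PVal) :
    ∀ m, (dedB (fun v => decide (v = a) || m v) L).filter q = (dedB m L).filter q := by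
  induction L with
  | nil => intro m; rfl
  | cons b L ih =>
    intro m
    by_cases hb : b = a
    · subst hb
      rw [dedB_cons, if_pos (by simp)]
      by_cases hm : m b = true
      · rw [dedB_cons, if_pos hm]; exact ih m
      · rw [dedB_cons, if_neg hm, List.filter_cons_of_neg (by simp [hq])]
    · by_cases hm : m b = true
      · rw [dedB_cons, if_pos (by simp [hm]), dedB_cons, if_pos hm]
        exact ih m
      · rw [dedB_cons, if_neg (by simp [hm, hb]), dedB_cons, if_neg hm]
        by_cases hqb : q b = true
        · rw [List.filter_cons_of_pos hqb, List.filter_cons_of_pos hqb]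
          refine congrArg _ ?_
          rw [show (fun v => decide (v = b) || (decide (v = a) || m v)) =
              (fun v => decide (v = a) || (decide (v = b) || m v)) from funext (fun v => by
                by_cases h1 : v = b <;> by_cases h2 : v = a <;> simp [h1, h2])]
          exact ih _
        · rw [List.filter_cons_of_neg (by simp [hqb]), List.filter_cons_of_neg (by simp [hqb])]
          rw [show (fun v => decide (v = b) || (decide (v = a) || m v)) =
              (fun v => decide (v = a) || (decide (v = b) || m v)) from funext (fun v => by
                by_cases h1 : v = b <;> by_cases h2 : v = a <;> simp [h1, h2])]
          exact ih _

theorem dedB_filter (q : PVal → Bool) (L : List PVal) : ∀ m, dedB m (L.filter q) = (dedB m L).filter q := by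
  induction L with
  | nil => intro m; rfl
  | cons a L ih =>
    intro m
    by_cases hma : m a = true
    · rw [dedB_cons, if_pos hma]
      by_cases hq : q a = true
      · rw [List.filter_cons_of_pos hq, dedB_cons, if_pos hma]; exact ih m
      · rw [List.filter_cons_of_neg (by simp [hq])]; exact ih m
    · rw [dedB_cons, if_neg hma]
      by_cases hq : q a = true
      · rw [List.filter_cons_of_pos hq, dedB_cons, if_neg hma, List.filter_cons_of_pos hq]
        exact congrArg _ (ih _)
      · rw [List.filter_cons_of_neg (by simp [hq]), List.filter_cons_of_neg (by simp [hq]),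
          ih m, ← dedB_filter_extend q a (by simpa using hq) L m]

theorem dedB_flatMap_congr {ι : Type} (m0 : PVal → Bool) (L : List ι) (g1 g2 : ι → List PVal)
    (hb : ∀ i ∈ L, ∀ m', (∀ v, m0 v = true → m' v = true) → dedB m' (g1 i) = dedB m' (g2 i)) :
    ∀ m', (∀ v, m0 v = true → m' v = true) → dedB m' (L.flatMap g1) = dedB m' (L.flatMap g2) := by
  induction L with
  | nil => intro m' _; rfl
  | cons i L ih =>
    intro m' hm'
    rw [List.flatMap_cons, List.flatMap_cons, dedB_append, dedB_append,
      hb i (by simp) m' hm']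
    exact congrArg (dedB m' (g2 i) ++ ·) (ih (fun j hj => hb j (by simp [hj]))
      (fun v => decide (v ∈ dedB m' (g2 i)) || m' v)
      (fun v hv => by simp only [hm' v hv, Bool.or_true]))

theorem dedB_append_congr {L1 L2 M1 M2 : List PVal}
    (h1 : ∀ m, dedB m L1 = dedB m L2) (h2 : ∀ m, dedB m M1 = dedB m M2) :
    ∀ m, dedB m (L1 ++ M1) = dedB m (L2 ++ M2) := by
  intro m
  rw [dedB_append, dedB_append, h1 m, h2]

theorem foldl_dedStep_char (L : List PVal) : ∀ (key : Int) (bag : List PEntry),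
    L.foldl dedStep (key, bag) = (key + ((dedB (mOf bag) L).length : Int), bag ++ zipFrom key (dedB (mOf bag) L)) := by
  induction L with
  | nil => intro key bag; simp [zipFrom]
  | cons v L ih =>
    intro key bag
    rw [List.foldl_cons]
    by_cases hv : v ∈ bag.map Prod.snd
    · rw [show dedStep (key, bag) v = (key, bag) from by simp [dedStep, hv], ih,
        dedB_cons, show mOf bag v = true from by simp [mOf, hv]]
      simp
    · have h2 : mOf bag v = false := by simp [mOf, hv]
      rw [show dedStep (key, bag) v = (key + 1, bag ++ [(key, v)]) from by simp [dedStep, hv], ih,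
        dedB_cons, if_neg (by simp [h2])]
      rw [show mOf (bag ++ [(key, v)]) = (fun w => decide (w = v) || mOf bag w) from
        funext (fun w => by by_cases h1 : w = v <;> simp [mOf, h1])]
      simp only [Prod.mk.injEq]
      refine ⟨by push_cast [List.length_cons]; ring, by simp [zipFrom]⟩

theorem foldl_dedStep_ext {L1 L2 : List PVal} (h : ∀ m, dedB m L1 = dedB m L2) (st : Int × List PEntry) :
    L1.foldl dedStep st = L2.foldl dedStep st := by
  obtain ⟨key, bag⟩ := st
  rw [foldl_dedStep_char, foldl_dedStep_char, h (mOf bag)]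

theorem sortL_perm (v : PVal) : (sortL v).Perm v := PySem.List.sorted_perm v _ false

theorem sortL_eq_of_perm {v1 v2 : PVal} (h : v1.Perm v2) : sortL v1 = sortL v2 :=
  PySem.List.sorted_eq_sorted_of_perm v1 v2 _ (fun a b hab => by
    simpa using congrArg (fun z => ofLex z) hab) h

theorem sortL_pairwise (v : PVal) : (sortL v).Pairwise (fun a b => toLex a ≤ toLex b) :=
  PySem.List.sorted_pairwise v _

theorem pairwise_eq_of_perm {v1 v2 : PVal} (h1 : v1.Pairwise (fun a b => toLex a ≤ toLex b))
    (h2 : v2.Pairwise (fun a b => toLex a ≤ toLex b)) (hp : v1.Perm v2) : v1 = v2 :=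
  PySem.List.eq_of_perm_of_pairwise_le_of_injective (fun p => toLex p)
    (fun a b hab => by simpa using congrArg (fun z => ofLex z) hab) hp h1 h2

theorem mem_sortL_iff {y : String × Int} {v : PVal} : y ∈ sortL v ↔ y ∈ v :=
  (sortL_perm v).mem_iff

theorem sortL_cons_inj {x : String × Int} {v1 v2 : PVal}
    (h1 : v1.Pairwise (fun a b => toLex a ≤ toLex b)) (h2 : v2.Pairwise (fun a b => toLex a ≤ toLex b))
    (h : sortL (x :: v1) = sortL (x :: v2)) : v1 = v2 := by
  have hp : (x :: v1).Perm (x :: v2) :=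
    ((sortL_perm (x :: v1)).symm.trans (h ▸ sortL_perm (x :: v2)))
  exact pairwise_eq_of_perm h1 h2 hp.cons_inv

-- dedB over an (element-wise) injective map
theorem dedB_map_inj (f : PVal → PVal) (L : List PVal) :
    ∀ m, (∀ a ∈ L, ∀ b ∈ L, f a = f b → a = b) →
    dedB m (L.map f) = (dedB (fun v => m (f v)) L).map f := by
  induction L with
  | nil => intro m _; rfl
  | cons a L ih =>
    intro m hinj
    rw [List.map_cons, dedB_cons, dedB_cons]
    by_cases hm : m (f a) = true
    · rw [if_pos hm, if_pos hm]
      exact ih m (fun u hu w hw => hinj u (by simp [hu]) w (by simp [hw]))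
    · rw [if_neg hm, if_neg hm, List.map_cons]
      refine congrArg _ ?_
      rw [ih _ (fun u hu w hw => hinj u (by simp [hu]) w (by simp [hw]))]
      refine congrArg _ (dedB_congr L _ _ (fun w hw => ?_))
      by_cases h1 : w = a
      · simp [h1]
      · by_cases h2 : f w = f a
        · exact absurd (hinj w (by simp [hw]) a (by simp) h2) h1
        · simp [h1, h2]

theorem perms_zero (xs : List (String × Int)) : PySem.List.permutations xs 0 = [[]] := by
  rw [PySem.List.permutations]

theorem perms_succ (xs : List (String × Int)) (k : Nat) :
    PySem.List.permutations xs (k + 1) =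
      (List.range xs.length).flatMap
        (fun i => (PySem.List.permutations (xs.eraseIdx i) k).map (fun p => xs.getD i pvD0 :: p)) := by
  conv_lhs => rw [PySem.List.permutations]
  refine List.flatMap_congr (fun i hi => ?_)
  rw [List.mem_range] at hi
  rw [List.getElem?_eq_getElem hi]
  simp [List.getD, List.getElem?_eq_getElem hi]

theorem perms_cons_succ (x : String × Int) (r : List (String × Int)) (k : Nat) :
    PySem.List.permutations (x :: r) (k + 1) =
      (PySem.List.permutations r k).map (fun p => x :: p) ++
      (List.range r.length).flatMap
        (fun i => (PySem.List.permutations (x :: r.eraseIdx i) k).map (fun p => r.getD i pvD0 :: p)) := by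
  rw [perms_succ, List.length_cons, List.range_succ_eq_map, List.flatMap_cons, List.flatMap_map]
  refine congrArg₂ _ (by simp) (List.flatMap_congr (fun i hi => ?_))
  rw [List.mem_range] at hi
  simp [List.eraseIdx_cons_succ, List.getD, List.getElem?_eq_getElem hi]

theorem perm_getD_cons_eraseIdx (l : List (String × Int)) : ∀ (i : Nat), i < l.length →
    l.Perm (l.getD i pvD0 :: l.eraseIdx i) := by
  induction l with
  | nil => intro i h; simp at h
  | cons a l ih =>
    intro i h
    cases i with
    | zero => simp
    | succ i =>
      have hi : i < l.length := by simpa using h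
      rw [List.getD_cons_succ, List.eraseIdx_cons_succ]
      exact (List.Perm.cons a (ih i hi)).trans (List.Perm.swap _ _ _)

theorem mem_perms_subperm {k : Nat} :
    ∀ {p : PVal} {xs : List (String × Int)}, p ∈ PySem.List.permutations xs k → p.Subperm xs ∧ p.length = k := by
  induction k with
  | zero => intro p xs h; rw [perms_zero] at h; simp at h; subst h; exact ⟨List.nil_subperm, rfl⟩
  | succ k ih =>
    intro p xs h
    rw [perms_succ, List.mem_flatMap] at h
    obtain ⟨i, hi, hp⟩ := h
    rw [List.mem_range] at hi
    rw [List.mem_map] at hp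
    obtain ⟨q, hq, rfl⟩ := hp
    obtain ⟨hsub, hlen⟩ := ih hq
    constructor
    · have h1 : (xs.getD i pvD0 :: q).Subperm (xs.getD i pvD0 :: xs.eraseIdx i) :=
        (List.subperm_cons _).mpr hsub
      exact h1.trans (perm_getD_cons_eraseIdx xs i hi).symm.subperm
    · simp [hlen]

theorem perms_cons_subset {k : Nat} : ∀ {p : PVal} {xs : List (String × Int)} (a : String × Int),
    p ∈ PySem.List.permutations xs k → p ∈ PySem.List.permutations (a :: xs) k := by
  induction k with
  | zero => intro p xs a h; rw [perms_zero] at h ⊢; exact h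
  | succ k ih =>
    intro p xs a h
    rw [perms_succ, List.mem_flatMap] at h
    obtain ⟨i, hi, hp⟩ := h
    rw [List.mem_range] at hi
    rw [List.mem_map] at hp
    obtain ⟨q, hq, rfl⟩ := hp
    rw [perms_cons_succ, List.mem_append]
    right
    rw [List.mem_flatMap]
    exact ⟨i, by simpa using hi, List.mem_map.mpr ⟨q, ih a hq, rfl⟩⟩

theorem mem_perms_of_sublist {w r : List (String × Int)} (h : w.Sublist r) :
    w ∈ PySem.List.permutations r w.length := by
  induction h with
  | slnil => simp only [List.length_nil, perms_zero]; simp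
  | @cons l₁ l₂ a hsub ih =>
    cases l₁ with
    | nil => simp only [List.length_nil, perms_zero]; simp
    | cons z w' => exact perms_cons_subset a ih
  | @cons₂ l₁ l₂ a hsub ih =>
    rw [List.length_cons, perms_cons_succ, List.mem_append]
    left
    exact List.mem_map.mpr ⟨l₁, ih, rfl⟩

theorem perms_filter_not_mem (x : String × Int) (k : Nat) : ∀ (s0 : List (String × Int)),
    (PySem.List.permutations (x :: s0) k).filter (fun p => !(decide (x ∈ p))) =
    (PySem.List.permutations s0 k).filter (fun p => !(decide (x ∈ p))) := by
  induction k with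
  | zero => intro s0; rw [perms_zero, perms_zero]
  | succ k ih =>
    intro s0
    rw [perms_cons_succ, perms_succ, List.filter_append]
    have h1 : ((PySem.List.permutations s0 k).map (fun p => x :: p)).filter
        (fun p => !(decide (x ∈ p))) = [] := by
      rw [List.filter_eq_nil_iff]
      intro a ha
      rw [List.mem_map] at ha
      obtain ⟨q, _, rfl⟩ := ha
      simp
    rw [h1, List.nil_append]
    rw [List.filter_flatMap, List.filter_flatMap]
    refine List.flatMap_congr (fun i hi => ?_)
    rw [List.mem_range] at hi
    rw [List.filter_map, List.filter_map]
    by_cases hx : s0.getD i pvD0 = x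
    · rw [show ((fun p => !(decide (x ∈ p))) ∘ (fun p => s0.getD i pvD0 :: p)) = (fun _ => false) from
        funext (fun p => by simp only [Function.comp_apply, hx]; simp)]
      simp
    · rw [show ((fun p => !(decide (x ∈ p))) ∘ (fun p => s0.getD i pvD0 :: p)) =
          ((fun p => !(decide (x ∈ p)))) from
        funext (fun p => by
          have hiff : (x ∈ s0.getD i pvD0 :: p) ↔ x ∈ p := by
            constructor
            · intro h
              rcases List.mem_cons.mp h with h | h
              · exact absurd h.symm hx
              · exact h
            · exact fun h => List.mem_cons_of_mem _ h
          simp only [Function.comp_apply]; rw [decide_eq_decide.mpr hiff])]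
      exact congrArg _ (ih (s0.eraseIdx i))

-- ==== new work: M5 and the master lemma ====
theorem masterM5 (x y : String × Int) (s0 : List (String × Int)) (k : Nat) (m : PVal → Bool)
    (hm : ∀ v : PVal, v.Subperm (x :: y :: s0) → x ∈ v → v.length = k + 1 → m (sortL v) = true) :
    dedB m ((PySem.List.permutations (x :: s0) k).map (fun p => sortL (y :: p))) =
    dedB m ((PySem.List.permutations s0 k).map (fun p => sortL (y :: p))) := by
  have hdrop : ∀ (P : List (List (String × Int))),
      (∀ p ∈ P, p.Subperm (x :: s0) ∧ p.length = k) →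
      dedB m (P.map (fun p => sortL (y :: p))) =
      dedB m ((P.filter (fun p => !(decide (x ∈ y :: p)))).map (fun p => sortL (y :: p))) := by
    intro P hP
    rw [dedB_drop (fun v => decide (x ∈ v)) _ m ?side]
    case side =>
      intro v hv hxv
      rw [List.mem_map] at hv
      obtain ⟨p, hp, rfl⟩ := hv
      obtain ⟨hsub, hlen⟩ := hP p hp
      rw [decide_eq_true_iff, mem_sortL_iff] at hxv
      refine hm (y :: p) ?_ hxv (by simp [hlen])
      exact ((List.subperm_cons y).mpr hsub).trans (List.Perm.swap x y s0).subperm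
    · congr 1
      rw [List.filter_map]
      refine congrArg _ (List.filter_congr (fun p _ => ?_))
      simp only [Function.comp_apply]
      have hd : decide (x ∈ sortL (y :: p)) = decide (x ∈ y :: p) :=
        decide_eq_decide.mpr mem_sortL_iff
      rw [hd]
  rw [hdrop (PySem.List.permutations (x :: s0) k) (fun p hp => mem_perms_subperm hp),
    hdrop (PySem.List.permutations s0 k)
      (fun p hp => ⟨(mem_perms_subperm hp).1.cons_right x, (mem_perms_subperm hp).2⟩)]
  by_cases hxy : x = y
  · subst hxy
    rw [show (fun p : PVal => !(decide (x ∈ x :: p))) = (fun _ => false) from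
      funext (fun p => by simp)]
    rw [List.filter_false, List.filter_false]
  · rw [show (fun p : PVal => !(decide (x ∈ y :: p))) = (fun p : PVal => !(decide (x ∈ p))) from
      funext (fun p => by simp [List.mem_cons, hxy]),
      perms_filter_not_mem x k s0]

theorem masterM (xs : List (String × Int)) : ∀ (k : Nat) (m : PVal → Bool),
    dedB m ((PySem.List.permutations xs k).map sortL) =
    dedB m ((PySem.List.combinations xs k).map sortL) := by
  induction xs with
  | nil =>
    intro k m
    cases k with
    | zero => rw [perms_zero, PySem.List.combinations_zero]
    | succ k => rw [perms_succ, PySem.List.combinations_nil_succ]; simp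
  | cons x r ih =>
    intro k m
    cases k with
    | zero => rw [perms_zero, PySem.List.combinations_zero]
    | succ k =>
      have hA : ∀ (P : List (List (String × Int))),
          ((P.map (fun p => x :: p)).map sortL) = (P.map sortL).map (fun v => sortL (x :: v)) := by
        intro P
        rw [List.map_map, List.map_map]
        exact List.map_congr_left (fun p _ => sortL_eq_of_perm ((sortL_perm p).symm.cons x))
      have hsorted : ∀ (P : List (List (String × Int))), ∀ v ∈ P.map sortL,
          v.Pairwise (fun a b => toLex a ≤ toLex b) := by
        intro P v hv
        rw [List.mem_map] at hv
        obtain ⟨p, _, rfl⟩ := hv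
        exact sortL_pairwise p
      have hHead : ∀ m', dedB m' (((PySem.List.permutations r k).map sortL).map (fun v => sortL (x :: v))) =
          dedB m' (((PySem.List.combinations r k).map sortL).map (fun v => sortL (x :: v))) := by
        intro m'
        rw [dedB_map_inj _ _ m'
            (fun a ha b hb h => sortL_cons_inj (hsorted _ a ha) (hsorted _ b hb) h),
          dedB_map_inj _ _ m'
            (fun a ha b hb h => sortL_cons_inj (hsorted _ a ha) (hsorted _ b hb) h),
          ih k _]
      have key : ∀ (m1 : PVal → Bool),
          (∀ w, w ∈ dedB m (((PySem.List.combinations r k).map sortL).map (fun v => sortL (x :: v))) → m1 w = true) →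
          (∀ w, m w = true → m1 w = true) →
          dedB m1 (((List.range r.length).flatMap
            (fun i => (PySem.List.permutations (x :: r.eraseIdx i) k).map (fun p => r.getD i pvD0 :: p))).map sortL) =
          dedB m1 ((PySem.List.combinations r (k+1)).map sortL) := by
        intro m1 hin hmem
        rw [← ih (k + 1) m1, perms_succ r k, List.map_flatMap, List.map_flatMap]
        simp only [List.map_map, Function.comp_def]
        refine dedB_flatMap_congr m1 (List.range r.length) _ _ ?_ m1 (fun v hv => hv)
        intro i hi m'' hmono
        rw [List.mem_range] at hi
        refine masterM5 x (r.getD i pvD0) (r.eraseIdx i) k m'' ?_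
        intro v hsub hxv hlen
        apply hmono
        have hv2 : v.Subperm (x :: r) :=
          hsub.trans (((perm_getD_cons_eraseIdx r i hi).symm.cons x).subperm)
        have hperm : v.Perm (x :: v.erase x) := List.perm_cons_erase hxv
        have hw : (v.erase x).Subperm r := (List.subperm_cons x).mp (hperm.symm.subperm.trans hv2)
        obtain ⟨q, hq1, hq2⟩ := hw
        have hlen_e : (v.erase x).length = k := by
          have h1 := hperm.length_eq
          rw [hlen] at h1
          simp only [List.length_cons] at h1
          omega
        have hqlen : q.length = k := by rw [hq1.length_eq, hlen_e]
        have hqmem : q ∈ PySem.List.permutations r k := by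
          rw [← hqlen]; exact mem_perms_of_sublist hq2
        have hfmem : sortL (x :: sortL q) ∈
            ((PySem.List.permutations r k).map sortL).map (fun v => sortL (x :: v)) :=
          List.mem_map.mpr ⟨sortL q, List.mem_map.mpr ⟨q, hqmem, rfl⟩, rfl⟩
        have heq : sortL (x :: sortL q) = sortL v :=
          sortL_eq_of_perm ((((sortL_perm q).cons x).trans (hq1.cons x)).trans hperm.symm)
        rcases dedB_mem _ m hfmem with hc | hc
        · rw [heq] at hc
          exact hmem _ hc
        · rw [hHead m, heq] at hc
          exact hin _ hc
      rw [perms_cons_succ, PySem.List.combinations_cons_succ, List.map_append, List.map_append,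
        hA (PySem.List.permutations r k), hA (PySem.List.combinations r k),
        dedB_append, dedB_append, hHead m]
      congr 1
      exact key _ (fun w hw => by rw [Bool.or_eq_true, decide_eq_true_iff]; exact Or.inl hw)
        (fun w hw => by rw [Bool.or_eq_true]; exact Or.inr hw)

theorem weight_sortL (p : PVal) (mw : Int) : pvCheckWeight p mw = wOK mw (sortL p) := by
  unfold pvCheckWeight wOK
  have h1 : (p.foldl (fun acc item => acc + item.2) 0) = (p.map (fun item => item.2)).sum := by
    rw [List.sum_eq_foldl, List.foldl_map]
  rw [h1]
  congr 1
  exact propext (by rw [List.Perm.sum_eq ((sortL_perm p).map (fun item => item.2))])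

theorem stepA_char {s : Int × PySem.Dict Int PVal} (mw : Int) (p : PVal) (hInv : InvA s) :
    absA (pvStepA mw s p) = (if pvCheckWeight p mw then dedStep (absA s) (sortL p) else absA s) ∧
    InvA (pvStepA mw s p) := by
  have hcont : s.2.contains s.1 = false := by
    apply Bool.eq_false_iff.mpr
    intro hc
    simp only [PySem.Dict.contains, List.any_eq_true, beq_iff_eq] at hc
    obtain ⟨e, he, heq⟩ := hc
    exact absurd (hInv e he) (by rw [heq]; exact lt_irrefl _)
  have hins : (s.2.insert s.1 (sortL p)).items = s.2.items ++ [(s.1, sortL p)] := by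
    simp [PySem.Dict.insert, hcont]
  have hvals : s.2.values = s.2.items.map Prod.snd := rfl
  have hiu : pvIsUnique (sortL p) s.2 = !(decide ((sortL p) ∈ s.2.items.map Prod.snd)) := by
    by_cases hc : (sortL p) ∈ s.2.items.map Prod.snd
    · simp only [hc, decide_true, Bool.not_true]
      exact List.all_eq_false.mpr ⟨sortL p, by rw [hvals]; exact hc, by simp⟩
    · simp only [hc, decide_false, Bool.not_false]
      refine List.all_eq_true.mpr (fun v hv => ?_)
      have hne : sortL p ≠ v := fun h => hc (by rw [h]; rw [hvals] at hv; exact hv)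
      simp [hne]
  have hInvIns : InvA (s.1 + 1, s.2.insert s.1 (sortL p)) := by
    intro e he
    rw [hins, List.mem_append] at he
    rcases he with he | he
    · exact lt_trans (hInv e he) (by omega)
    · simp only [List.mem_singleton] at he
      rw [he]
      exact lt_add_one _
  simp only [pvStepA]
  by_cases hw : pvCheckWeight p mw = true
  · rw [if_pos hw, if_pos hw]
    by_cases hu : (sortL p) ∈ s.2.items.map Prod.snd
    · have hds : dedStep (absA s) (sortL p) = absA s := by
        simp only [dedStep, absA]
        rw [if_pos hu]
      by_cases hsz : s.2.size > 0
      · rw [if_pos hsz, show pvIsUnique (sortL p) s.2 = false from by rw [hiu]; simp [hu]]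
        simp only [Bool.false_eq_true, if_false]
        exact ⟨hds.symm, hInv⟩
      · -- size = 0 contradicts membership hu
        exfalso
        have : s.2.items = [] := List.eq_nil_of_length_eq_zero (by
          simp only [PySem.Dict.size] at hsz; omega)
        rw [this] at hu; simp at hu
    · have hds : dedStep (absA s) (sortL p) = (s.1 + 1, s.2.items ++ [(s.1, sortL p)]) := by
        simp only [dedStep, absA]
        rw [if_neg hu]
      by_cases hsz : s.2.size > 0
      · rw [if_pos hsz, show pvIsUnique (sortL p) s.2 = true from by rw [hiu]; simp [hu]]
        simp only [if_true]
        exact ⟨by rw [hds]; simp [absA, hins], hInvIns⟩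
      · rw [if_neg hsz]
        exact ⟨by rw [hds]; simp [absA, hins], hInvIns⟩
  · rw [if_neg hw, if_neg hw]
    exact ⟨rfl, hInv⟩

theorem foldA_char (mw : Int) (L : List (List (String × Int))) :
    ∀ (s : Int × PySem.Dict Int PVal), InvA s →
    absA (L.foldl (pvStepA mw) s) = ((L.map sortL).filter (wOK mw)).foldl dedStep (absA s) ∧
    InvA (L.foldl (pvStepA mw) s) := by
  induction L with
  | nil => intro s hInv; exact ⟨rfl, hInv⟩
  | cons p L ih =>
    intro s hInv
    obtain ⟨h1, h2⟩ := stepA_char mw p hInv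
    rw [List.foldl_cons, List.map_cons, List.filter_cons]
    by_cases hw : pvCheckWeight p mw = true
    · rw [if_pos hw] at h1
      rw [← weight_sortL p mw, hw]
      simp only [if_true, List.foldl_cons]
      obtain ⟨h3, h4⟩ := ih (pvStepA mw s p) h2
      exact ⟨by rw [h3]; (try rw [h1]), h4⟩
    · rw [if_neg hw] at h1
      rw [← weight_sortL p mw, Bool.eq_false_iff.mpr hw]
      simp only [Bool.false_eq_true, if_false]
      obtain ⟨h3, h4⟩ := ih (pvStepA mw s p) h2
      exact ⟨by rw [h3]; (try rw [h1]), h4⟩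

theorem stepB_char {s : (Int × PySem.Dict Int PVal) × PySem.Set PVal} (mw : Int) (c : PVal) (hInv : InvB s) :
    absA (pvStepB mw s c).1 = (if wOK mw (sortL c) then dedStep (absA s.1) (sortL c) else absA s.1) ∧
    InvB (pvStepB mw s c) := by
  obtain ⟨hkeys, hseen⟩ := hInv
  have hcont : s.1.2.contains s.1.1 = false := by
    apply Bool.eq_false_iff.mpr
    intro hc
    simp only [PySem.Dict.contains, List.any_eq_true, beq_iff_eq] at hc
    obtain ⟨e, he, heq⟩ := hc
    exact absurd (hkeys e he) (by rw [heq]; exact lt_irrefl _)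
  have hins : (s.1.2.insert s.1.1 (sortL c)).items = s.1.2.items ++ [(s.1.1, sortL c)] := by
    simp [PySem.Dict.insert, hcont]
  have hsc : PySem.Set.contains s.2 (sortL c) = decide ((sortL c) ∈ s.1.2.items.map Prod.snd) := by
    by_cases hc : (sortL c) ∈ s.1.2.items.map Prod.snd
    · simp only [hc, decide_true]
      exact List.contains_iff_mem.mpr ((hseen (sortL c)).mpr hc)
    · simp only [hc, decide_false]
      apply Bool.eq_false_iff.mpr
      intro h
      exact hc ((hseen (sortL c)).mp (List.contains_iff_mem.mp h))
  simp only [pvStepB]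
  by_cases hw : decide ((c.map (fun item => item.2)).sum ≤ mw) = true
  · have hw' : wOK mw (sortL c) = true := by
      rw [show wOK mw (sortL c) = pvCheckWeight c mw from (weight_sortL c mw).symm]
      unfold pvCheckWeight
      rw [show (c.foldl (fun acc item => acc + item.2) 0) = (c.map (fun item => item.2)).sum from by
        rw [List.sum_eq_foldl, List.foldl_map]]
      exact hw
    rw [if_pos hw, hw', if_pos rfl]
    by_cases hu : (sortL c) ∈ s.1.2.items.map Prod.snd
    · rw [show PySem.Set.contains s.2 (sortL c) = true from by rw [hsc]; simp [hu], if_pos rfl]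
      refine ⟨?_, hkeys, hseen⟩
      simp only [dedStep, absA]
      rw [if_pos hu]
    · rw [show PySem.Set.contains s.2 (sortL c) = false from by rw [hsc]; simp [hu]]
      simp only [Bool.false_eq_true, if_false]
      constructor
      · simp only [dedStep, absA]
        rw [if_neg hu]
        simp [hins]
      constructor
      · intro e he
        rw [hins, List.mem_append] at he
        rcases he with he | he
        · exact lt_trans (hkeys e he) (lt_add_one _)
        · simp only [List.mem_singleton] at he
          rw [he]
          exact lt_add_one _
      · intro v
        have hadd : PySem.Set.add s.2 (sortL c) = s.2 ++ [sortL c] := by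
          simp only [PySem.Set.add]
          rw [show PySem.Set.contains s.2 (sortL c) = false from by rw [hsc]; simp [hu]]
          simp
        simp only [hadd, hins, List.mem_append, List.map_append, hseen v]
        simp
  · have hw' : wOK mw (sortL c) = false := by
      apply Bool.eq_false_iff.mpr
      intro h
      apply hw
      rw [show wOK mw (sortL c) = pvCheckWeight c mw from (weight_sortL c mw).symm] at h
      unfold pvCheckWeight at h
      rw [show (c.foldl (fun acc item => acc + item.2) 0) = (c.map (fun item => item.2)).sum from by
        rw [List.sum_eq_foldl, List.foldl_map]] at h
      exact h
    rw [if_neg hw, hw']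
    simp only [Bool.false_eq_true, if_false]
    refine ⟨?_, hkeys, hseen⟩
    first | rfl | trivial

theorem foldB_char (mw : Int) (L : List (List (String × Int))) :
    ∀ (s : (Int × PySem.Dict Int PVal) × PySem.Set PVal), InvB s →
    absA (L.foldl (pvStepB mw) s).1 = ((L.map sortL).filter (wOK mw)).foldl dedStep (absA s.1) ∧
    InvB (L.foldl (pvStepB mw) s) := by
  induction L with
  | nil => intro s hInv; exact ⟨rfl, hInv⟩
  | cons c L ih =>
    intro s hInv
    obtain ⟨h1, h2⟩ := stepB_char mw c hInv
    rw [List.foldl_cons, List.map_cons, List.filter_cons]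
    obtain ⟨h3, h4⟩ := ih (pvStepB mw s c) h2
    by_cases hw : wOK mw (sortL c) = true
    · rw [if_pos hw] at h1
      rw [hw]
      simp only [if_true, List.foldl_cons]
      exact ⟨by rw [h3]; (try rw [h1]), h4⟩
    · rw [if_neg hw] at h1
      rw [Bool.eq_false_iff.mpr hw]
      simp only [Bool.false_eq_true, if_false]
      exact ⟨by rw [h3]; (try rw [h1]), h4⟩

theorem foldl_outerA (arr : List (String × Int)) (mw : Int) (js : List Nat) :
    ∀ (s : Int × PySem.Dict Int PVal) (ca : Int), InvA s →
    absA ((js.foldl (pvOuterA arr mw) (s, ca)).1) =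
      (AStream arr mw ca js.length).foldl dedStep (absA s) := by
  induction js with
  | nil => intro s ca _; rfl
  | cons j js ih =>
    intro s ca hInv
    rw [List.foldl_cons]
    obtain ⟨h1, h2⟩ := foldA_char mw (PySem.List.permutations arr ca.toNat) s hInv
    have houter : pvOuterA arr mw (s, ca) j =
        ((PySem.List.permutations arr ca.toNat).foldl (pvStepA mw) s, ca - 1) := rfl
    rw [houter, ih _ (ca - 1) h2, List.length_cons,
      show AStream arr mw ca (js.length + 1) =
        SA arr mw ca.toNat ++ AStream arr mw (ca - 1) js.length from rfl,
      List.foldl_append,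
      show SA arr mw ca.toNat =
        ((PySem.List.permutations arr ca.toNat).map sortL).filter (wOK mw) from rfl,
      h1]

theorem foldl_outerB (arr : List (String × Int)) (mw : Int) : ∀ (j : Nat)
    (s : (Int × PySem.Dict Int PVal) × PySem.Set PVal), InvB s →
    absA (((PySem.List.pyRange (j : Int) 0 (-1)).foldl (pvOuterB arr mw) s).1) =
      (BStream arr mw j).foldl dedStep (absA s.1) := by
  intro j
  induction j with
  | zero =>
    intro s _
    rw [show ((0 : Nat) : Int) = 0 from rfl, PySem.List.pyRange_neg_one_eq_nil (le_refl 0)]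
    rfl
  | succ j ih =>
    intro s hInv
    rw [PySem.List.pyRange_neg_one_cons (by positivity),
      show ((j + 1 : Nat) : Int) - 1 = (j : Int) from by push_cast; ring,
      List.foldl_cons]
    obtain ⟨h1, h2⟩ := foldB_char mw (PySem.List.combinations arr ((j + 1 : Nat) : Int).toNat) s hInv
    have htn : ((j + 1 : Nat) : Int).toNat = j + 1 := by simp
    rw [htn] at h1
    have houter : pvOuterB arr mw s ((j + 1 : Nat) : Int) =
        (PySem.List.combinations arr ((j + 1 : Nat) : Int).toNat).foldl (pvStepB mw) s := rfl
    rw [houter, ih _ h2, htn,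
      show BStream arr mw (j + 1) = SB arr mw (j + 1) ++ BStream arr mw j from rfl,
      List.foldl_append,
      show SB arr mw (j + 1) =
        ((PySem.List.combinations arr (j + 1)).map sortL).filter (wOK mw) from rfl,
      h1]

theorem SAB_ded (arr : List (String × Int)) (mw : Int) (k : Nat) :
    ∀ m, dedB m (SA arr mw k) = dedB m (SB arr mw k) := by
  intro m
  unfold SA SB
  rw [dedB_filter, dedB_filter, masterM arr k m]

theorem streams_ded (arr : List (String × Int)) (mw : Int) : ∀ (j : Nat) (m : PVal → Bool),
    dedB m (AStream arr mw (j : Int) j) = dedB m (BStream arr mw j) := by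
  intro j
  induction j with
  | zero => intro m; rfl
  | succ j ih =>
    intro m
    rw [show AStream arr mw ((j + 1 : Nat) : Int) (j + 1) =
        SA arr mw ((j + 1 : Nat) : Int).toNat ++ AStream arr mw (((j + 1 : Nat) : Int) - 1) j from rfl,
      show ((j + 1 : Nat) : Int) - 1 = (j : Int) from by push_cast; ring,
      show ((j + 1 : Nat) : Int).toNat = j + 1 from by simp,
      show BStream arr mw (j + 1) = SB arr mw (j + 1) ++ BStream arr mw j from rfl]
    exact dedB_append_congr (SAB_ded arr mw (j + 1)) ih m

theorem ports_eq (arr : List (String × Int)) (mw : Int) :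
    below_weight_combinations arr mw = below_weight_combinations_alt arr mw := by
  unfold below_weight_combinations below_weight_combinations_alt
  have hInvA : InvA ((0 : Int), (⟨[]⟩ : PySem.Dict Int PVal)) := by
    intro e he; simp [PySem.Dict.items] at he
  have hInvB : InvB (((0 : Int), (⟨[]⟩ : PySem.Dict Int PVal)), ([] : PySem.Set PVal)) := by
    refine ⟨hInvA, fun v => ?_⟩
    simp [PySem.Dict.items]
  have hA := foldl_outerA arr mw (List.range arr.length) (0, ⟨[]⟩) (arr.length : Int) hInvA
  have hB := foldl_outerB arr mw arr.length ((0, ⟨[]⟩), []) hInvB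
  rw [List.length_range] at hA
  calc (((List.range arr.length).foldl (pvOuterA arr mw) ((0, ⟨[]⟩), (arr.length : Int))).1.2).items
      = (absA (((List.range arr.length).foldl (pvOuterA arr mw) ((0, ⟨[]⟩), (arr.length : Int)))).1).2 := rfl
    _ = ((AStream arr mw (arr.length : Int) arr.length).foldl dedStep (absA (0, ⟨[]⟩))).2 := by rw [hA]
    _ = ((BStream arr mw arr.length).foldl dedStep (absA (0, ⟨[]⟩))).2 := by
          rw [foldl_dedStep_ext (streams_ded arr mw arr.length) (absA (0, ⟨[]⟩))]
    _ = (((PySem.List.pyRange (arr.length : Int) 0 (-1)).foldl (pvOuterB arr mw)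
          ((0, ⟨[]⟩), ([] : PySem.Set PVal))).1.2).items := by rw [← hB]; rfl

-- ===== VERDICT (by name: the statement is the Claim_ definition above) =====
theorem below_weight_combinations_spec : Claim_equal_below_weight_combinations := by
  intro array max_weight _hdom
  unfold Spec_below_weight_combinations
  exact ports_eq array max_weight
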